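-- pv_equiv track=rewrite | github.com/codecontemplator/aoc2025 | day12/day12p1dlx.py | parse
-- ===== SOURCE A (Python) =====
-- def parse_region(line):
--     dims_raw, quantities_raw = line.split(":")
--     dims = tuple(map(int, dims_raw.split("x")))
--     quantities = list(map(int,quantities_raw.split()))
--     return dims, quantities
--
-- def parse_shape(lines):
--     lines.pop(0)
--     return list(map(list,lines))
--
-- def parse(lines):
--     groups = []
--     cg = []
--     for line in lines:
--         if len(line) == 0:
--             groups.append(cg)
--             cg = []
--         else:
--             cg.append(line)
--
--     groups.append(cg)
--     regions = groups.pop()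
--     return list(map(parse_shape,groups)), list(map(parse_region, regions))
-- ===== SOURCE B (Python) =====
-- def parse_region(line):
--     dims_raw, quantities_raw = line.split(":")
--     dims = tuple(map(int, dims_raw.split("x")))
--     quantities = list(map(int, quantities_raw.split()))
--     return dims, quantities
--
--
-- def _split_groups(ls):
--     # recursive decomposition: cut at the first blank line, recurse on the rest
--     if "" in ls:
--         i = ls.index("")
--         return [ls[:i]] + _split_groups(ls[i + 1:])
--     return [ls]
--
--
-- def parse(lines):
--     groups = _split_groups(list(lines))
--     regions = groups.pop()
--     shapes = [[list(l) for l in g[1:]] for g in groups]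
--     return shapes, [parse_region(l) for l in regions]
-- ===== Notes on version B (the rewrite author's own statement) =====
-- stated objective: alternative
-- what changed: A's single accumulator loop that grows the current group line by line is replaced by a recursive decomposition that finds the first blank line, slices the prefix off as one group and recurses on the remainder; parse_region is unchanged and shapes are built by skipping the header line instead of popping it.
-- crash fix: On inputs whose region lines are well-formed but where some shape group is empty (adjacent or leading blank lines), A raises IndexError from parse_shape's pop(0) while B returns that shape as an empty list. — e.g. on parse(["", "1x1: 1"]): A raises IndexError, B returns ([[]], [([1, 1], [1])])
import Mathlib
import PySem

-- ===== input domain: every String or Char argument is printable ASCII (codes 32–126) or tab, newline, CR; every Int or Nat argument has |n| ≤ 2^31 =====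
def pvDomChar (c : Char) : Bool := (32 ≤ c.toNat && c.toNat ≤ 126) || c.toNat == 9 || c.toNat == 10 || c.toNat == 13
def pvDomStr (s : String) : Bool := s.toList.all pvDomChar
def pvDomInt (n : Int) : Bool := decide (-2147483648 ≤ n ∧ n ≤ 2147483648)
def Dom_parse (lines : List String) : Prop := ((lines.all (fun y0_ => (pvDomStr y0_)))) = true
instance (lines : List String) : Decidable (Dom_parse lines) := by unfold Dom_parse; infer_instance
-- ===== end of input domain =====

-- B replaces A's running-accumulator grouping by a recursive cut-at-first-blank-line
-- decomposition (find the first blank line, slice, recurse); objective: alternative, same cost.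

-- ===== PORT A =====
-- shared helper: parse_region is textually identical in A and in B.
-- line.split(":") must give exactly 2 parts and every int() must succeed; Python raises
-- ValueError otherwise — Pre_parse excludes those lines, so the `_ => ([],[])` and
-- `.getD 0` arms are unreachable inside Pre_parse.
def parseRegion (line : String) : List Int × List Int :=
  match (PySem.Str.split? line ":").getD [] with
  | [dimsRaw, quantitiesRaw] =>
      (((PySem.Str.split? dimsRaw "x").getD []).map (fun s => (PySem.Int.ofStr? s).getD 0),
       (PySem.Str.split₀ quantitiesRaw).map (fun s => (PySem.Int.ofStr? s).getD 0))
  | _ => ([], [])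

-- list(c) of a Python string: the list of its one-character strings
def charList (l : String) : List String := l.toList.map (fun c => String.ofList [c])

-- parse_shape: lines.pop(0) raises IndexError on an empty group (excluded by Pre_parse)
def parseShapeA (g : List String) : List (List String) :=
  match g with
  | [] => []
  | _ :: rest => rest.map charList

def parse (lines : List String) : List (List (List String)) × (List (List Int × List Int)) :=
  let st := lines.foldl
    (fun (st : List (List String) × List String) line =>
      if PySem.Str.len line = 0 then (st.1 ++ [st.2], ([] : List String))
      else (st.1, st.2 ++ [line]))
    ([], [])
  let groups := st.1 ++ [st.2]
  let regions := groups.getLastD []      -- groups.pop(): groups is never empty here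
  let shapeGroups := groups.dropLast
  (shapeGroups.map parseShapeA, regions.map parseRegion)

-- ===== PORT B =====
-- _split_groups: if "" in ls: i = ls.index(""); [ls[:i]] + _split_groups(ls[i+1:]) else [ls]
def splitGroupsB (ls : List String) : List (List String) :=
  match h : PySem.List.index? ls "" with
  | some i => ls.take i :: splitGroupsB (ls.drop (i + 1))
  | none => [ls]
termination_by ls.length
decreasing_by
  obtain ⟨hk, -, -⟩ := PySem.List.getElem_of_index?_eq_some h
  simp only [List.length_drop]; omega

def parse_alt (lines : List String) : List (List (List String)) × (List (List Int × List Int)) :=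
  let groups := splitGroupsB lines
  let regions := groups.getLastD []      -- groups.pop(): _split_groups never returns []
  let shapeGroups := groups.dropLast
  (shapeGroups.map (fun g => (g.drop 1).map charList), regions.map parseRegion)

-- ===== PRECONDITION & SPEC =====
-- independent segmentation used only to state Pre_ (split the lines at blank lines)
def pvSegs : List String → List (List String)
  | [] => [[]]
  | l :: ls =>
    if l = "" then [] :: pvSegs ls
    else match pvSegs ls with
      | [] => [[l]]
      | g :: rest => (l :: g) :: rest

def pvRegionOK (line : String) : Bool :=
  match (PySem.Str.split? line ":").getD [] with
  | [d, q] => (((PySem.Str.split? d "x").getD []).all (fun s => (PySem.Int.ofStr? s).isSome)) &&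
              ((PySem.Str.split₀ q).all (fun s => (PySem.Int.ofStr? s).isSome))
  | _ => false

-- Pre_parse is exactly where the Python A returns: every shape group must be nonempty
-- (parse_shape's pop(0) raises IndexError on an empty one) and every region line must
-- split on ":" into two int-parsable halves (ValueError otherwise).
def Pre_parse (lines : List String) : Prop :=
  (∀ g ∈ (pvSegs lines).dropLast, g ≠ []) ∧
  (∀ l ∈ (pvSegs lines).getLastD [], pvRegionOK l = true)
instance (lines : List String) : Decidable (Pre_parse lines) := by unfold Pre_parse; infer_instance

def pvWitness_parse : List String := ["##.", "#..", "", ".#", "", "2x3: 1 2", "10x10: 7"]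

-- A raises IndexError whenever some shape group (a segment before the last blank line) is
-- empty while the region lines are still well-formed; B returns the empty shape there.
def Raises_parse (lines : List String) : Prop :=
  (∃ g ∈ (pvSegs lines).dropLast, g = []) ∧
  (∀ l ∈ (pvSegs lines).getLastD [], pvRegionOK l = true)
instance (lines : List String) : Decidable (Raises_parse lines) := by unfold Raises_parse; infer_instance
def pvRaiseWitness_parse : List String := ["", "1x1: 1"]
def pvRaiseWitnessOut_parse : List (List (List String)) × (List (List Int × List Int)) :=
  ([[]], [([1, 1], [1])])

def Spec_parse (lines : List String) (out : List (List (List String)) × (List (List Int × List Int))) : Prop := out = parse_alt lines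
instance (lines : List String) (out : List (List (List String)) × (List (List Int × List Int))) : Decidable (Spec_parse lines out) := by unfold Spec_parse; infer_instance

-- ===== CLAIM (what is proved, stated in full; the proofs are below) =====
def Claim_equal_parse : Prop := ∀ (lines : List String), Dom_parse lines → Pre_parse lines → Spec_parse lines (parse lines)
def Claim_raises_parse : Prop := (∀ (lines : List String), Dom_parse lines → Raises_parse lines → ¬ Pre_parse lines) ∧ (Dom_parse (pvRaiseWitness_parse) ∧ Raises_parse (pvRaiseWitness_parse) ∧ parse_alt (pvRaiseWitness_parse) = pvRaiseWitnessOut_parse)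

-- ===== LEMMAS AND PROOFS =====

theorem str_len_eq_zero_iff (s : String) : PySem.Str.len s = 0 ↔ s = "" := by
  rw [PySem.Str.len_eq]
  constructor
  · intro h
    have h0 : s.toList = [] := List.length_eq_zero_iff.mp (by exact_mod_cast h)
    simpa using congrArg String.ofList h0
  · intro h; subst h; decide

theorem SB_of_index_some (ls : List String) (i : Nat)
    (h : PySem.List.index? ls "" = some i) :
    splitGroupsB ls = ls.take i :: splitGroupsB (ls.drop (i + 1)) := by
  rw [splitGroupsB]
  split
  · next j hj => rw [h] at hj; cases hj; rfl
  · next hn => rw [h] at hn; cases hn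

theorem SB_of_index_none (ls : List String)
    (h : PySem.List.index? ls "" = none) : splitGroupsB ls = [ls] := by
  rw [splitGroupsB]
  split
  · next j hj => rw [h] at hj; cases hj
  · rfl

theorem SB_nil : splitGroupsB [] = [[]] :=
  SB_of_index_none [] (by rw [PySem.List.index?_eq_none_iff]; simp)

theorem SB_cons_blank (t : List String) : splitGroupsB ("" :: t) = [] :: splitGroupsB t := by
  rw [SB_of_index_some _ 0 (PySem.List.index?_cons_self "" t)]; rfl

theorem SB_cons_ne (l : String) (t : List String) (h : l ≠ "") :
    splitGroupsB (l :: t) = (l :: (splitGroupsB t).headI) :: (splitGroupsB t).tail := by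
  have hidx := PySem.List.index?_cons_of_ne (x := l) (v := "") t h
  cases hj : PySem.List.index? t "" with
  | none =>
    rw [SB_of_index_none _ hj]
    rw [SB_of_index_none _ (by rw [hidx, hj]; rfl)]
    rfl
  | some j =>
    rw [SB_of_index_some _ j hj]
    rw [SB_of_index_some (l :: t) (j + 1) (by rw [hidx, hj]; rfl)]
    simp [List.take_succ_cons, List.drop_succ_cons]

theorem SB_ne_nil (ls : List String) : splitGroupsB ls ≠ [] := by
  rw [splitGroupsB]
  cases h : PySem.List.index? ls "" <;> simp

theorem headI_cons_tail {α : Type} [Inhabited α] (l : List α) (h : l ≠ []) :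
    l.headI :: l.tail = l := by
  cases l with
  | nil => exact absurd rfl h
  | cons a t => rfl

theorem foldl_groups (ls : List String) (gs : List (List String)) (cg : List String) :
    (ls.foldl
      (fun (st : List (List String) × List String) line =>
        if PySem.Str.len line = 0 then (st.1 ++ [st.2], ([] : List String))
        else (st.1, st.2 ++ [line])) (gs, cg)).1 ++
    [(ls.foldl
      (fun (st : List (List String) × List String) line =>
        if PySem.Str.len line = 0 then (st.1 ++ [st.2], ([] : List String))
        else (st.1, st.2 ++ [line])) (gs, cg)).2] =
    gs ++ (cg ++ (splitGroupsB ls).headI) :: (splitGroupsB ls).tail := by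
  induction ls generalizing gs cg with
  | nil => simp [SB_nil]
  | cons l t ih =>
    by_cases hl : l = ""
    · subst hl
      simp only [List.foldl_cons, if_pos (by decide : PySem.Str.len "" = 0)]
      rw [ih (gs ++ [cg]) [], SB_cons_blank]
      simp only [List.headI_cons, List.tail_cons, List.nil_append, List.append_nil]
      rw [List.append_assoc, List.singleton_append, headI_cons_tail _ (SB_ne_nil t)]
    · simp only [List.foldl_cons, if_neg ((not_congr (str_len_eq_zero_iff l)).mpr hl)]
      rw [ih gs (cg ++ [l]), SB_cons_ne l t hl]
      simp

theorem parseShapeA_eq (g : List String) :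
    parseShapeA g = (g.drop 1).map charList := by
  cases g <;> rfl

theorem parse_spec : Claim_equal_parse := by
  intro lines _ _
  unfold Spec_parse parse parse_alt
  have hg := foldl_groups lines [] []
  rw [List.nil_append, List.nil_append, headI_cons_tail _ (SB_ne_nil lines)] at hg
  simp only [hg]
  refine congrArg (fun x => (x, _)) ?_
  exact List.map_congr_left (fun g _ => parseShapeA_eq g)

@[simp] theorem parse_raises : Claim_raises_parse := by
  unfold Claim_raises_parse
  exact ⟨fun lines _ h hpre => (h.1.elim (fun g hg => hpre.1 g hg.1 hg.2)),
    ⟨by decide, by decide, by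
      have hSB : splitGroupsB ["", "1x1: 1"] = [[], ["1x1: 1"]] := by
        rw [SB_cons_blank, SB_of_index_none _ (by decide)]
      show parse_alt ["", "1x1: 1"] = pvRaiseWitnessOut_parse
      unfold parse_alt
      rw [hSB]
      decide⟩⟩
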